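-- pv_equiv track=rewrite | github.com/OZestina/TheGreatestGrace | codingTest/programmers/py/220309_더맵.py | solution
-- ===== SOURCE A (Python) =====
-- import heapq
-- import heapq
--
-- def solution(scoville, K):
--     answer = 0
--     heapq.heapify(scoville)
--
--     while True:
--         if scoville[0] >= K:
--             break
--         if len(scoville) < 2:
--             return -1
--         heapq.heappush(scoville, heapq.heappop(scoville) + heapq.heappop(scoville) * 2)
--         answer += 1
--     return answer
-- ===== SOURCE B (Python) =====
-- def _insert_sorted(h, x):
--     i = 0
--     while i < len(h) and h[i] < x:
--         i += 1
--     return h[:i] + [x] + h[i:]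
--
-- def solution(scoville, K):
--     # Sort once, keep the working list sorted; unlike A this does not mutate
--     # the caller's list (return-value equivalence only).
--     h = sorted(scoville)
--     answer = 0
--     while h[0] < K:
--         if len(h) < 2:
--             return -1
--         h = _insert_sorted(h[2:], h[0] + 2 * h[1])
--         answer += 1
--     return answer
-- ===== Notes on version B (the rewrite author's own statement) =====
-- stated objective: alternative
-- what changed: Replaces A's binary heap (heapify + heappush/heappop) by sorting once and maintaining a sorted list with a scan-and-insert helper, popping the two smallest from the front each round; B does not mutate the caller's list; Pre_ excludes only the empty list, on which A raises IndexError (and so does B).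
import Mathlib
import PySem

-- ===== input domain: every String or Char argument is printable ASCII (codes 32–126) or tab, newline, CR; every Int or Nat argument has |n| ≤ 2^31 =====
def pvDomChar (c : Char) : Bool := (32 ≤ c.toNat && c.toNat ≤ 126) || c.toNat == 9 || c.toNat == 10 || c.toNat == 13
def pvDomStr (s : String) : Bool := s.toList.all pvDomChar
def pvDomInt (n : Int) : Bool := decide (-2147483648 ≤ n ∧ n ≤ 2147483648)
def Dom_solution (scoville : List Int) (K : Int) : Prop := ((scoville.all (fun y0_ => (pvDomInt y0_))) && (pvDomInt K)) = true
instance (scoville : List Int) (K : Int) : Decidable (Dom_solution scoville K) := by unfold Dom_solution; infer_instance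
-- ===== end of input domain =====

-- B replaces A's binary heap by a sort-once + ordered-insert sorted list (alternative data
-- structure, same result).  A mutates its input list (heapify/push/pop) and B does not:
-- the equivalence proved here is about the RETURN value only.


-- ===== PORT A =====
-- heapq is modelled by its observable semantics: after heapify, heap[0] is min(heap),
-- heappop returns min(heap) and removes one instance of it, heappush adds its argument.
-- This is exact for the RETURNED value on every input Pre_ admits (every popped/inspected
-- value is the multiset minimum, identical to what the real binary heap yields;
-- scoville[0] on an empty list raises IndexError in Python and is excluded by Pre_).
def pyHeapMin (h : List Int) : Int :=
  match h with
  | [] => 0        -- unreachable under Pre_ (Python raises IndexError before any min is taken)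
  | x :: xs => xs.foldl min x

theorem pyHeapMin_mem (x : Int) (xs : List Int) : pyHeapMin (x :: xs) ∈ x :: xs := by
  rcases PySem.List.foldl_min_mem xs x with h | h
  · simp [pyHeapMin, h]
  · simp [pyHeapMin]
    right
    exact h

def solGoA (h : List Int) (K ans : Int) : Int :=
  match h with
  | [] => -1       -- scoville[0] raises IndexError in Python; excluded by Pre_
  | x :: xs =>
    let m := pyHeapMin (x :: xs)            -- scoville[0] of the heapified list
    if m ≥ K then ans                        -- break; return answer
    else if (x :: xs).length < 2 then -1     -- return -1
    else
      let h1 := (x :: xs).erase m            -- first heappop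
      let m2 := pyHeapMin h1                 -- second heappop's value
      let h2 := h1.erase m2
      solGoA (h2 ++ [m + m2 * 2]) K (ans + 1)   -- heappush of pop + pop*2; answer += 1
termination_by h.length
decreasing_by
  rename_i hg1 hg2
  have hlen : ¬ (x :: xs).length < 2 := by first | exact hg1 | exact hg2
  have hm : pyHeapMin (x :: xs) ∈ x :: xs := pyHeapMin_mem x xs
  have h1len : ((x :: xs).erase (pyHeapMin (x :: xs))).length = xs.length := by
    rw [List.length_erase_of_mem hm]; simp
  have hxs : xs ≠ [] := by
    simp at hlen
    intro hnil; simp [hnil] at hlen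
  have h1ne : (x :: xs).erase (pyHeapMin (x :: xs)) ≠ [] := by
    intro hnil; rw [hnil] at h1len; simp at h1len; exact hxs (List.eq_nil_of_length_eq_zero h1len.symm)
  obtain ⟨a, as, ha⟩ := List.exists_cons_of_ne_nil h1ne
  have hm2 : pyHeapMin ((x :: xs).erase (pyHeapMin (x :: xs))) ∈ (x :: xs).erase (pyHeapMin (x :: xs)) := by
    rw [ha]; exact pyHeapMin_mem a as
  have h2len := List.length_erase_of_mem hm2
  simp only [List.length_append, List.length_cons, List.length_nil, h2len, h1len]
  have hx1 : 0 < xs.length := List.length_pos_of_ne_nil hxs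
  omega

def solution (scoville : List Int) (K : Int) : Int :=
  solGoA scoville K 0

-- ===== PORT B =====
-- port of _insert_sorted: the scan 'while i < len(h) and h[i] < x: i += 1' computes the
-- longest prefix of elements < x (takeWhile); result is h[:i] + [x] + h[i:].
def insertSorted (h : List Int) (x : Int) : List Int :=
  h.takeWhile (· < x) ++ x :: h.dropWhile (· < x)

-- the port needs this for termination
theorem insertSorted_length (h : List Int) (x : Int) :
    (insertSorted h x).length = h.length + 1 := by
  have hl := congrArg List.length
    (List.takeWhile_append_dropWhile (p := fun y : Int => decide (y < x)) (l := h))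
  simp only [List.length_append] at hl
  simp [insertSorted]
  omega

def solGoB (h : List Int) (K ans : Int) : Int :=
  match h with
  | [] => -1                                   -- h[0] raises IndexError in Python; excluded by Pre_
  | [x] => if x < K then -1 else ans           -- loop entered with len(h) < 2 → return -1
  | x :: y :: ys =>
    if x < K then solGoB (insertSorted ys (x + 2 * y)) K (ans + 1)
    else ans
termination_by h.length
decreasing_by simp [insertSorted_length]

def solution_alt (scoville : List Int) (K : Int) : Int :=
  solGoB (PySem.List.sorted scoville (fun v => v) false) K 0

-- ===== PRECONDITION & SPEC =====
-- Pre_ excludes only the empty list, on which Python's scoville[0] raises IndexError.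
def Pre_solution (scoville : List Int) (K : Int) : Prop := scoville ≠ []
instance (scoville : List Int) (K : Int) : Decidable (Pre_solution scoville K) := by unfold Pre_solution; infer_instance
def pvWitness_solution : List Int × Int := ([1, 2, 3, 9, 10, 12], 7)

def Spec_solution (scoville : List Int) (K : Int) (out : Int) : Prop := out = solution_alt scoville K
instance (scoville : List Int) (K : Int) (out : Int) : Decidable (Spec_solution scoville K out) := by unfold Spec_solution; infer_instance

-- ===== CLAIM (what is proved, stated in full; the proofs are below) =====
def Claim_equal_solution : Prop := ∀ (scoville : List Int) (K : Int), Dom_solution scoville K → Pre_solution scoville K → Spec_solution scoville K (solution scoville K)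

-- ===== LEMMAS AND PROOFS =====

theorem pyHeapMin_le (x : Int) (xs : List Int) :
    ∀ a ∈ x :: xs, pyHeapMin (x :: xs) ≤ a := by
  intro a ha
  rcases PySem.List.foldl_min_le xs x with ⟨h1, h2⟩
  rcases List.mem_cons.mp ha with rfl | ha
  · simpa [pyHeapMin] using h1
  · simpa [pyHeapMin] using h2 a ha

-- the minimum of any permutation of a sorted list is its head
theorem pyHeapMin_of_perm_sorted (hA : List Int) (x : Int) (xs : List Int)
    (hp : hA.Perm (x :: xs)) (hs : (x :: xs).Pairwise (· ≤ ·)) :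
    pyHeapMin hA = x := by
  have hne : hA ≠ [] := by
    intro h; rw [h] at hp; exact (List.cons_ne_nil x xs) hp.nil_eq.symm
  obtain ⟨a, as, rfl⟩ := List.exists_cons_of_ne_nil hne
  have hmem : pyHeapMin (a :: as) ∈ x :: xs := hp.mem_iff.mp (pyHeapMin_mem a as)
  have hxmem : x ∈ a :: as := hp.mem_iff.mpr (by simp)
  have h1 : pyHeapMin (a :: as) ≤ x := pyHeapMin_le a as x hxmem
  have h2 : x ≤ pyHeapMin (a :: as) := by
    rcases List.mem_cons.mp hmem with heq | hmem'
    · omega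
    · exact (List.pairwise_cons.mp hs).1 _ hmem'
  omega

theorem insertSorted_cons (y : Int) (t : List Int) (x : Int) :
    insertSorted (y :: t) x =
      if y < x then y :: insertSorted t x else x :: y :: t := by
  by_cases h : y < x
  · simp [insertSorted, h]
  · simp [insertSorted, h]

theorem insertSorted_perm (x : Int) : ∀ t : List Int, (insertSorted t x).Perm (x :: t) := by
  intro t
  induction t with
  | nil => simp [insertSorted]
  | cons y ys ih =>
    rw [insertSorted_cons]
    by_cases h : y < x
    · simp only [h, if_pos]
      exact (ih.cons y).trans (List.Perm.swap x y ys)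
    · simp [h]

theorem insertSorted_sorted (x : Int) :
    ∀ t : List Int, t.Pairwise (· ≤ ·) → (insertSorted t x).Pairwise (· ≤ ·) := by
  intro t
  induction t with
  | nil => simp [insertSorted]
  | cons y ys ih =>
    intro hp
    rcases List.pairwise_cons.mp hp with ⟨hy, hys⟩
    rw [insertSorted_cons]
    by_cases h : y < x
    · simp only [h, if_pos]
      refine List.pairwise_cons.mpr ⟨?_, ih hys⟩
      intro b hb
      rcases List.mem_cons.mp ((insertSorted_perm x ys).mem_iff.mp hb) with rfl | hb'
      · omega
      · exact hy b hb'
    · simp only [h, if_neg, not_false_iff]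
      refine List.pairwise_cons.mpr ⟨?_, hp⟩
      intro b hb
      rcases List.mem_cons.mp hb with rfl | hb'
      · omega
      · have := hy b hb'
        omega

-- main invariant: A's heap state and B's sorted state are permutations of each other
theorem go_eq (n : ℕ) : ∀ (hA hB : List Int) (K ans : Int),
    hA.length = n → hA.Perm hB → hB.Pairwise (· ≤ ·) →
    solGoA hA K ans = solGoB hB K ans := by
  induction n using Nat.strong_induction_on with
  | _ n ih =>
    intro hA hB K ans hlen hp hs
    rcases hB with _ | ⟨x, xs⟩
    · have : hA = [] := List.Perm.eq_nil hp
      subst this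
      rw [solGoA.eq_def, solGoB.eq_def]
    ·
      have hne : hA ≠ [] := by
        intro h; rw [h] at hp; exact (List.cons_ne_nil x xs) hp.nil_eq.symm
      obtain ⟨a, as, rfl⟩ := List.exists_cons_of_ne_nil hne
      have hm : pyHeapMin (a :: as) = x := pyHeapMin_of_perm_sorted _ x xs hp hs
      have hle : (a :: as).length = (x :: xs).length := hp.length_eq
      rw [solGoA.eq_def]
      simp only []
      rw [hm]
      by_cases hK : x ≥ K
      · -- front ≥ K: both return ans
        rw [if_pos hK]
        rcases xs with _ | ⟨y, ys⟩
        · simp [solGoB, show ¬ x < K by omega]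
        · simp [solGoB, show ¬ x < K by omega]
      · rw [if_neg hK]
        rcases xs with _ | ⟨y, ys⟩
        ·
          -- fewer than 2 elements: both return -1
          have : (a :: as).length < 2 := by simp only [List.length_cons, List.length_nil] at hle ⊢; omega
          rw [if_pos this]
          simp [solGoB, show x < K by omega]
        ·
          have h2 : ¬ (a :: as).length < 2 := by simp only [List.length_cons] at hle ⊢; omega
          rw [if_neg h2]
          -- first pop
          have hxmem : x ∈ a :: as := hp.mem_iff.mpr (by simp)
          have hperm1 : ((a :: as).erase x).Perm (y :: ys) := by
            have := hp.erase x
            rwa [List.erase_cons_head] at this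
          have hs1 : (y :: ys).Pairwise (· ≤ ·) := (List.pairwise_cons.mp hs).2
          have hm2 : pyHeapMin ((a :: as).erase x) = y :=
            pyHeapMin_of_perm_sorted _ y ys hperm1 hs1
          rw [hm2]
          -- second pop
          have hperm2 : (((a :: as).erase x).erase y).Perm ys := by
            have := hperm1.erase y
            rwa [List.erase_cons_head] at this
          -- reassemble and recurse
          have hperm3 : ((((a :: as).erase x).erase y) ++ [x + y * 2]).Perm
              (insertSorted ys (x + 2 * y)) := by
            have e1 : ((((a :: as).erase x).erase y) ++ [x + y * 2]).Perm ((x + y * 2) :: ys) :=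
              (List.perm_append_singleton _ _).trans (hperm2.cons _)
            have e2 : ((x + y * 2) :: ys).Perm (insertSorted ys (x + 2 * y)) := by
              rw [show x + y * 2 = x + 2 * y by ring]
              exact (insertSorted_perm _ ys).symm
            exact e1.trans e2
          have hlen3 : ((((a :: as).erase x).erase y) ++ [x + y * 2]).length = n - 1 := by
            have l1 := List.length_erase_of_mem hxmem
            have hymem : y ∈ (a :: as).erase x := hperm1.mem_iff.mpr (by simp)
            have l2 := List.length_erase_of_mem hymem
            simp only [List.length_append, List.length_cons, List.length_nil, l2, l1]
            simp only [List.length_cons] at hle hlen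
            omega
          have hslt : n - 1 < n := by simp only [List.length_cons] at hlen; omega
          have hsorted3 : (insertSorted ys (x + 2 * y)).Pairwise (· ≤ ·) :=
            insertSorted_sorted _ ys (List.pairwise_cons.mp hs1).2
          have := ih (n - 1) hslt _ _ K (ans + 1) hlen3 hperm3 hsorted3
          rw [this]
          simp [solGoB, show x < K by omega]

-- ===== VERDICT (by name: the statement is the Claim_ definition above) =====
theorem solution_spec : Claim_equal_solution := by
  intro scoville K _ _
  unfold Spec_solution solution solution_alt
  exact go_eq scoville.length scoville _ K 0 rfl
    (PySem.List.sorted_perm scoville (fun v => v) false).symm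
    (PySem.List.sorted_pairwise scoville (fun v => v))
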